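-- pv_equiv track=rewrite | github.com/xonmin/Algorithm | pythonProject/recommandCodingTest/globalMaximum.py | solution
-- ===== SOURCE A (Python) =====
-- from itertools import combinations
--
-- def solution(arr, m):
--     INF = 100000000;
--
--     comb = combinations(arr, m)
--     globalMaximum = 0
--     for com in comb:
--         diff_case = combinations(com, 2)
--         currentMininmum = INF
--
--         for diff in diff_case:
--             currentMininmum = min(currentMininmum, abs(diff[0] - diff[1]))
--
--         globalMaximum = max(globalMaximum, currentMininmum)
--
--     return globalMaximum
-- ===== SOURCE B (Python) =====
-- def solution(arr, m):
--     INF = 100000000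
--     s = sorted(arr)
--
--     def feasible(d):
--         cnt, last = 0, None
--         for x in s:
--             if last is None or x - last >= d:
--                 cnt += 1
--                 last = x
--         return cnt >= m
--
--     lo, hi = 0, INF
--     while lo < hi:
--         mid = (lo + hi + 1) // 2
--         if feasible(mid):
--             lo = mid
--         else:
--             hi = mid - 1
--     return lo
-- ===== Notes on version B (the rewrite author's own statement) =====
-- stated objective: faster
-- what changed: Replaced the brute-force scan of all C(n,m) m-subsets (computing the min of all C(m,2) pairwise differences for each) by sort + binary search on the answer in [0, 100000000] with a greedy linear feasibility check.
import Mathlib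
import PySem

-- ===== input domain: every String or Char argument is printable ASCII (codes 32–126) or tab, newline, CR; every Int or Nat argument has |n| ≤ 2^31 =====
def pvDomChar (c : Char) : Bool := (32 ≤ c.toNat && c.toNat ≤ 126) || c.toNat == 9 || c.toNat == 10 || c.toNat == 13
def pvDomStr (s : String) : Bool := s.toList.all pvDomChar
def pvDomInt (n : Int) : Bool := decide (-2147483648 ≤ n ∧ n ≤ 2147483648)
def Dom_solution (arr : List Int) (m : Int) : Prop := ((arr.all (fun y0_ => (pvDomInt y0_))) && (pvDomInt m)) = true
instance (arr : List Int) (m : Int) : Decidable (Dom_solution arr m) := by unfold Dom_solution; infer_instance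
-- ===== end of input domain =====

-- B is a different algorithm: sort + binary search on the answer with a greedy feasibility check,
-- instead of A's brute-force enumeration of all m-subsets; equal on every input with m ≥ 0.

-- ===== PORT A =====
-- combinations(com, 2) in itertools order: pairs (com[i], com[j]) for i < j
def pvPairs2 : List Int → List (Int × Int)
  | [] => []
  | x :: xs => xs.map (fun y => (x, y)) ++ pvPairs2 xs

-- the inner loop: currentMininmum over all pairwise absolute differences, starting from INF
def pvInnerMin (com : List Int) : Int :=
  (pvPairs2 com).foldl (fun cur p => min cur |p.1 - p.2|) 100000000

-- combinations(arr, m) ported as the length-m sublists of arr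
def solution (arr : List Int) (m : Int) : Int :=
  (List.sublistsLen m.toNat arr).foldl (fun g com => max g (pvInnerMin com)) 0

-- ===== PORT B =====
-- the greedy feasibility check of Source B: one pass with state (cnt, last)
def pvFeasible (s : List Int) (m d : Int) : Bool :=
  let st := s.foldl
    (fun (st : Int × Option Int) x =>
      match st.2 with
      | none => (st.1 + 1, some x)
      | some last => if d ≤ x - last then (st.1 + 1, some x) else st)
    ((0 : Int), (none : Option Int))
  m ≤ st.1

-- the while-loop of Source B; the Nat argument is a fuel guard making the recursion structural
-- (hi - lo decreases each iteration, so fuel (hi - lo).toNat suffices; nothing else changes)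
def pvBSearch (s : List Int) (m : Int) : Nat → Int → Int → Int
  | 0, lo, _ => lo
  | fuel + 1, lo, hi =>
    if lo < hi then
      let mid := PySem.Int.floordiv (lo + hi + 1) 2
      if pvFeasible s m mid then pvBSearch s m fuel mid hi
      else pvBSearch s m fuel lo (mid - 1)
    else lo

def solution_alt (arr : List Int) (m : Int) : Int :=
  let s := PySem.List.sorted arr (fun x => x) false
  pvBSearch s m 100000000 0 100000000

-- ===== PRECONDITION & SPEC =====
-- A raises ValueError when m < 0 (combinations rejects a negative r); those inputs are excluded.
def Pre_solution (arr : List Int) (m : Int) : Prop := 0 ≤ m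
instance (arr : List Int) (m : Int) : Decidable (Pre_solution arr m) := by
  unfold Pre_solution; infer_instance

def pvWitness_solution : List Int × Int := ([1, 3, 7], 2)

def Spec_solution (arr : List Int) (m : Int) (out : Int) : Prop := out = solution_alt arr m
instance (arr : List Int) (m : Int) (out : Int) : Decidable (Spec_solution arr m out) := by
  unfold Spec_solution; infer_instance

-- ===== CLAIM (what is proved, stated in full; the proofs are below) =====
def Claim_equal_solution : Prop := ∀ (arr : List Int) (m : Int),
  Dom_solution arr m → Pre_solution arr m → Spec_solution arr m (solution arr m)

-- ===== LEMMAS AND PROOFS =====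

-- "there is an m-subset of arr all of whose pairwise distances are ≥ d (and d is within the INF cap)"
def pvEd (arr : List Int) (m d : Int) : Prop :=
  ∃ com ∈ List.sublistsLen m.toNat arr, d ≤ 100000000 ∧ com.Pairwise (fun a b => d ≤ |a - b|)

-- ---- A-side characterisation ----

theorem pv_le_foldl_min (l : List Int) (init d : Int) :
    d ≤ l.foldl min init ↔ d ≤ init ∧ ∀ v ∈ l, d ≤ v := by
  induction l generalizing init with
  | nil => simp
  | cons x xs ih =>
    simp only [List.foldl_cons, ih, List.mem_cons]
    constructor
    · rintro ⟨h1, h2⟩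
      exact ⟨le_trans h1 (min_le_left _ _),
        fun v hv => hv.elim (fun e => e ▸ le_trans h1 (min_le_right _ _)) (h2 v)⟩
    · rintro ⟨h1, h2⟩
      exact ⟨le_min h1 (h2 x (Or.inl rfl)), fun v hv => h2 v (Or.inr hv)⟩

theorem pv_pairs2_forall (R : Int → Int → Prop) (l : List Int) :
    (∀ p ∈ pvPairs2 l, R p.1 p.2) ↔ l.Pairwise R := by
  induction l with
  | nil => simp [pvPairs2]
  | cons x xs ih =>
    simp only [pvPairs2, List.mem_append, List.mem_map, List.pairwise_cons, ← ih]
    constructor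
    · intro h
      exact ⟨fun y hy => h (x, y) (Or.inl ⟨y, hy, rfl⟩),
        fun p hp => h p (Or.inr hp)⟩
    · rintro ⟨h1, h2⟩ p hp
      rcases hp with ⟨y, hy, rfl⟩ | hp
      · exact h1 y hy
      · exact h2 p hp

theorem pv_le_innerMin (com : List Int) (d : Int) :
    d ≤ pvInnerMin com ↔ d ≤ 100000000 ∧ com.Pairwise (fun a b => d ≤ |a - b|) := by
  have : pvInnerMin com = ((pvPairs2 com).map (fun p => |p.1 - p.2|)).foldl min 100000000 := by
    rw [List.foldl_map]
    rfl
  rw [this, pv_le_foldl_min, ← pv_pairs2_forall (fun a b => d ≤ |a - b|)]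
  constructor
  · rintro ⟨h1, h2⟩
    exact ⟨h1, fun p hp => h2 _ (List.mem_map_of_mem hp)⟩
  · rintro ⟨h1, h2⟩
    refine ⟨h1, fun v hv => ?_⟩
    obtain ⟨p, hp, rfl⟩ := List.mem_map.mp hv
    exact h2 p hp

theorem pv_foldl_max_char (l : List Int) (init : Int) :
    (l.foldl max init = init ∨ l.foldl max init ∈ l) ∧ init ≤ l.foldl max init ∧
      ∀ v ∈ l, v ≤ l.foldl max init := by
  induction l generalizing init with
  | nil => simp
  | cons x xs ih =>
    obtain ⟨h1, h2, h3⟩ := ih (max init x)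
    refine ⟨?_, le_trans (le_max_left _ _) h2, ?_⟩
    · rcases h1 with h1 | h1
      · rcases max_choice init x with hm | hm
        · exact Or.inl (by rw [List.foldl_cons, h1, hm])
        · exact Or.inr (by rw [List.foldl_cons, h1, hm]; exact List.mem_cons_self)
      · exact Or.inr (List.mem_cons_of_mem _ h1)
    · intro v hv
      rcases List.mem_cons.mp hv with rfl | hv
      · exact le_trans (le_max_right _ _) h2
      · exact h3 v hv

theorem pv_solution_mem (arr : List Int) (m : Int) :
    (solution arr m = 0 ∨ pvEd arr m (solution arr m)) ∧ 0 ≤ solution arr m ∧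
      ∀ d, pvEd arr m d → d ≤ solution arr m := by
  have hrw : solution arr m
      = ((List.sublistsLen m.toNat arr).map pvInnerMin).foldl max 0 := by
    unfold solution; rw [List.foldl_map]
  obtain ⟨h1, h2, h3⟩ := pv_foldl_max_char ((List.sublistsLen m.toNat arr).map pvInnerMin) 0
  rw [← hrw] at h1 h2 h3
  refine ⟨?_, ?_, ?_⟩
  · rcases h1 with h1 | h1
    · exact Or.inl h1
    · obtain ⟨com, hcom, heq⟩ := List.mem_map.mp h1
      exact Or.inr ⟨com, hcom, (pv_le_innerMin com (solution arr m)).mp (le_of_eq heq.symm)⟩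
  · exact h2
  · intro d ⟨com, hcom, hd1, hd2⟩
    exact le_trans ((pv_le_innerMin com d).mpr ⟨hd1, hd2⟩)
      (h3 _ (List.mem_map_of_mem hcom))

-- ---- B-side: structural greedy ----

def pvGcnt (d last : Int) : List Int → Nat
  | [] => 0
  | x :: xs => if d ≤ x - last then pvGcnt d x xs + 1 else pvGcnt d last xs

def pvGtop (d : Int) : List Int → Nat
  | [] => 0
  | x :: xs => pvGcnt d x xs + 1

theorem pv_feas_aux (d : Int) (l : List Int) : ∀ (c last : Int),
    (l.foldl (fun (st : Int × Option Int) x =>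
      match st.2 with
      | none => (st.1 + 1, some x)
      | some last => if d ≤ x - last then (st.1 + 1, some x) else st) (c, some last)).1
    = c + pvGcnt d last l := by
  induction l with
  | nil => intro c last; simp [pvGcnt]
  | cons x xs ih =>
    intro c last
    simp only [List.foldl_cons]
    have hf : (fun (st : Int × Option Int) x =>
        match st.2 with
        | none => (st.1 + 1, some x)
        | some last => if d ≤ x - last then (st.1 + 1, some x) else st) (c, some last) x
        = if d ≤ x - last then (c + 1, some x) else (c, some last) := rfl
    by_cases h : d ≤ x - last
    · rw [if_pos h, ih, pvGcnt, if_pos h]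
      push_cast; omega
    · rw [if_neg h, ih, pvGcnt, if_neg h]

theorem pv_feasible_iff (s : List Int) (m d : Int) :
    pvFeasible s m d = true ↔ m ≤ (pvGtop d s : Int) := by
  cases s with
  | nil => simp [pvFeasible, pvGtop]
  | cons x xs =>
    unfold pvFeasible
    simp only [decide_eq_true_iff, List.foldl_cons, pvGtop]
    rw [pv_feas_aux d xs (0 + 1) x]
    push_cast; omega

-- greedy achieves its count: a witness sub-selection
theorem pv_gcnt_exists (d : Int) (hd : 0 ≤ d) (l : List Int) (last : Int) :
    ∃ t : List Int, t.Sublist l ∧ t.length = pvGcnt d last l ∧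
      t.Pairwise (fun a b => d ≤ b - a) ∧ ∀ h ∈ t, d ≤ h - last := by
  induction l generalizing last with
  | nil => exact ⟨[], by simp [pvGcnt]⟩
  | cons x xs ih =>
    by_cases h : d ≤ x - last
    · obtain ⟨t, hsub, hlen, hp, hmem⟩ := ih x
      refine ⟨x :: t, List.Sublist.cons₂ x hsub, ?_, ?_, ?_⟩
      · simp [hlen, pvGcnt, if_pos h]
      · exact List.pairwise_cons.mpr ⟨fun y hy => hmem y hy, hp⟩
      · intro y hy
        rcases List.mem_cons.mp hy with rfl | hy
        · exact h
        · have := hmem y hy; omega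
    · obtain ⟨t, hsub, hlen, hp, hmem⟩ := ih last
      exact ⟨t, List.Sublist.cons x hsub, by simp [hlen, pvGcnt, if_neg h], hp, hmem⟩

-- greedy optimality
theorem pv_gcnt_ge (d : Int) (l : List Int) (hs : l.Pairwise (· ≤ ·)) (last : Int)
    (t : List Int) (ht : t.Sublist l) (hp : t.Pairwise (fun a b => d ≤ b - a))
    (hh : ∀ h ∈ t, d ≤ h - last) : t.length ≤ pvGcnt d last l := by
  induction l generalizing last t with
  | nil => simp [List.eq_nil_of_sublist_nil ht]
  | cons x xs ih =>
    obtain ⟨hx, hxs⟩ := List.pairwise_cons.mp hs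
    by_cases h : d ≤ x - last
    · rw [pvGcnt, if_pos h]
      cases t with
      | nil => simp
      | cons y t' =>
        obtain ⟨hy, hp'⟩ := List.pairwise_cons.mp hp
        rcases List.sublist_cons_iff.mp ht with hsub | ⟨r, hre, hsub⟩
        · have hxy : x ≤ y := hx y (hsub.subset List.mem_cons_self)
          have ht' : t'.Sublist xs := (List.sublist_cons_self y t').trans hsub
          have := ih hxs x t' ht' hp' (fun z hz => by have := hy z hz; omega)
          simp only [List.length_cons]; omega
        · injection hre with h1 h2
          subst h2
          have := ih hxs x t' hsub hp' (fun z hz => h1 ▸ hy z hz)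
          simp only [List.length_cons]; omega
    · rw [pvGcnt, if_neg h]
      cases t with
      | nil => simp
      | cons y t' =>
        rcases List.sublist_cons_iff.mp ht with hsub | ⟨r, hre, hsub⟩
        · exact ih hxs last _ hsub hp hh
        · injection hre with h1 h2
          exact absurd (hh y List.mem_cons_self) (by rw [h1]; exact h)

theorem pv_gtop_ge (d : Int) (s : List Int) (hs : s.Pairwise (· ≤ ·))
    (t : List Int) (ht : t.Sublist s) (hp : t.Pairwise (fun a b => d ≤ b - a)) :
    t.length ≤ pvGtop d s := by
  cases s with
  | nil => simp [List.eq_nil_of_sublist_nil ht, pvGtop]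
  | cons x xs =>
    obtain ⟨hx, hxs⟩ := List.pairwise_cons.mp hs
    rw [pvGtop]
    cases t with
    | nil => simp
    | cons y t' =>
      obtain ⟨hy, hp'⟩ := List.pairwise_cons.mp hp
      rcases List.sublist_cons_iff.mp ht with hsub | ⟨r, hre, hsub⟩
      · have hxy : x ≤ y := hx y (hsub.subset List.mem_cons_self)
        have ht' : t'.Sublist xs := (List.sublist_cons_self y t').trans hsub
        have := pv_gcnt_ge d xs hxs x t' ht' hp' (fun z hz => by have := hy z hz; omega)
        simp only [List.length_cons]; omega
      · injection hre with h1 h2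
        subst h2
        have := pv_gcnt_ge d xs hxs x t' hsub hp' (fun z hz => h1 ▸ hy z hz)
        simp only [List.length_cons]; omega

-- ---- the bridge ----

theorem pv_gtop_exists (d : Int) (hd : 0 ≤ d) (s : List Int) :
    ∃ g : List Int, g.Sublist s ∧ g.length = pvGtop d s ∧
      g.Pairwise (fun a b => d ≤ b - a) := by
  cases s with
  | nil => exact ⟨[], by simp [pvGtop]⟩
  | cons x xs =>
    obtain ⟨t, hsub, hlen, hp, hmem⟩ := pv_gcnt_exists d hd xs x
    exact ⟨x :: t, List.Sublist.cons₂ x hsub,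
      by simp [pvGtop, hlen],
      List.pairwise_cons.mpr ⟨fun y hy => hmem y hy, hp⟩⟩

theorem pv_sorted_pairwise_le (l : List Int) :
    (PySem.List.sorted l (fun x => x) false).Pairwise (· ≤ ·) :=
  PySem.List.sorted_pairwise l (fun x => x)

theorem pv_bridge (arr : List Int) (m d : Int) (hm : 0 ≤ m) (hd : 1 ≤ d) (hINF : d ≤ 100000000) :
    pvFeasible (PySem.List.sorted arr (fun x => x) false) m d = true ↔ pvEd arr m d := by
  set s := PySem.List.sorted arr (fun x => x) false with hs
  have hperm : s.Perm arr := PySem.List.sorted_perm arr (fun x => x) false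
  have hsort : s.Pairwise (· ≤ ·) := pv_sorted_pairwise_le arr
  rw [pv_feasible_iff]
  have hsymm : ∀ {a b : Int}, d ≤ |a - b| → d ≤ |b - a| := by
    intro a b h; rw [abs_sub_comm]; exact h
  constructor
  · intro hF
    obtain ⟨g, hgs, hglen, hgp⟩ := pv_gtop_exists d (by omega) s
    have hmn : m.toNat ≤ g.length := by rw [hglen]; omega
    set tk := g.take m.toNat with htk
    have htklen : tk.length = m.toNat := by
      rw [htk, List.length_take]; omega
    have htksub : tk.Sublist s := (List.take_sublist _ _).trans hgs
    have htkp : tk.Pairwise (fun a b => d ≤ b - a) := hgp.sublist (List.take_sublist _ _)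
    obtain ⟨com, hcp, hcs⟩ := (htksub.subperm).trans hperm.subperm
    refine ⟨com, List.mem_sublistsLen.mpr ⟨hcs, by rw [hcp.length_eq, htklen]⟩, hINF, ?_⟩
    have habs : tk.Pairwise (fun a b => d ≤ |a - b|) := htkp.imp (fun hab =>
      le_trans hab ((le_abs_self _).trans_eq (abs_sub_comm _ _)))
    exact (List.Perm.pairwise_iff hsymm hcp).mpr habs
  · rintro ⟨com, hmem, _, hpw⟩
    obtain ⟨hcs, hclen⟩ := List.mem_sublistsLen.mp hmem
    set t := PySem.List.sorted com (fun x => x) false with htdef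
    have htp : t.Perm com := PySem.List.sorted_perm com (fun x => x) false
    have htle : t.Pairwise (· ≤ ·) := pv_sorted_pairwise_le com
    have htsp : List.Subperm t s :=
      List.Subperm.trans ⟨com, htp.symm, hcs⟩ hperm.symm.subperm
    have hts : t.Sublist s :=
      List.sublist_of_subperm_of_sortedLE htsp htle.sortedLE hsort.sortedLE
    have htabs : t.Pairwise (fun a b => d ≤ |a - b|) :=
      (List.Perm.pairwise_iff hsymm htp).mpr hpw
    have htR : t.Pairwise (fun a b => d ≤ b - a) := by
      have := List.pairwise_and_iff.mpr ⟨htle, htabs⟩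
      exact this.imp (fun hab => by
        rcases hab with ⟨h1, h2⟩
        rw [abs_sub_comm, abs_of_nonneg (by omega)] at h2
        exact h2)
    have := pv_gtop_ge d s hsort t hts htR
    have hlen : t.length = m.toNat := by rw [htp.length_eq, hclen]
    omega

-- ---- binary search ----

theorem pvMidBounds (lo hi : Int) (h : lo < hi) :
    lo < PySem.Int.floordiv (lo + hi + 1) 2 ∧ PySem.Int.floordiv (lo + hi + 1) 2 ≤ hi := by
  rw [PySem.Int.floordiv_eq_ediv_of_pos (by omega)]
  omega

theorem pv_bsearch_char (s : List Int) (m : Int)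
    (Hanti : ∀ d d', 1 ≤ d → d ≤ d' → d' ≤ 100000000 →
      pvFeasible s m d' = true → pvFeasible s m d = true) :
    ∀ (fuel : Nat) (lo hi : Int), (hi - lo).toNat ≤ fuel → 0 ≤ lo → lo ≤ hi → hi ≤ 100000000 →
      (pvFeasible s m lo = true ∨ lo = 0) →
      (∀ d, hi < d → d ≤ 100000000 → pvFeasible s m d = false) →
      (pvFeasible s m (pvBSearch s m fuel lo hi) = true ∨ pvBSearch s m fuel lo hi = 0) ∧
        0 ≤ pvBSearch s m fuel lo hi ∧ pvBSearch s m fuel lo hi ≤ 100000000 ∧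
        ∀ d, pvBSearch s m fuel lo hi < d → d ≤ 100000000 → pvFeasible s m d = false := by
  intro fuel
  induction fuel with
  | zero =>
    intro lo hi hfu h0 hlh hhi hflo hup
    have : lo = hi := by omega
    subst this
    exact ⟨hflo, h0, hhi, fun d hd1 hd2 => hup d hd1 hd2⟩
  | succ fuel ih =>
    intro lo hi hfu h0 hlh hhi hflo hup
    by_cases hlt : lo < hi
    · have hmid := pvMidBounds lo hi hlt
      by_cases hf : pvFeasible s m (PySem.Int.floordiv (lo + hi + 1) 2) = true
      · have hstep : pvBSearch s m (fuel + 1) lo hi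
            = pvBSearch s m fuel (PySem.Int.floordiv (lo + hi + 1) 2) hi := by
          simp only [pvBSearch, if_pos hlt, hf, if_true]
        rw [hstep]
        exact ih (PySem.Int.floordiv (lo + hi + 1) 2) hi (by omega) (by omega) (by omega)
          hhi (Or.inl hf) hup
      · have hstep : pvBSearch s m (fuel + 1) lo hi
            = pvBSearch s m fuel lo (PySem.Int.floordiv (lo + hi + 1) 2 - 1) := by
          simp only [pvBSearch, if_pos hlt]
          rw [if_neg hf]
        rw [hstep]
        refine ih lo (PySem.Int.floordiv (lo + hi + 1) 2 - 1) (by omega) h0 (by omega)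
          (by omega) hflo ?_
        intro d hd1 hd2
        by_cases hdh : hi < d
        · exact hup d hdh hd2
        · cases hfd : pvFeasible s m d with
          | false => rfl
          | true =>
            exact absurd (Hanti (PySem.Int.floordiv (lo + hi + 1) 2) d (by omega) (by omega)
              hd2 hfd) hf
    · have : lo = hi := by omega
      subst this
      have hstep : pvBSearch s m (fuel + 1) lo lo = lo := by
        simp only [pvBSearch, if_neg hlt]
      rw [hstep]
      exact ⟨hflo, h0, hhi, fun d hd1 hd2 => hup d hd1 hd2⟩

-- ===== VERDICT (by name: the statement is the Claim_ definition above) =====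
theorem pv_Ed_anti (arr : List Int) (m d d' : Int) (hdd : d ≤ d') (hEd : pvEd arr m d') :
    pvEd arr m d := by
  obtain ⟨com, hmem, hI, hpw⟩ := hEd
  exact ⟨com, hmem, by omega, hpw.imp (fun h => by omega)⟩

theorem solution_spec : Claim_equal_solution := by
  intro arr m _ hm
  have hm' : 0 ≤ m := hm
  unfold Spec_solution
  set s := PySem.List.sorted arr (fun x => x) false with hsdef
  have hrr : solution_alt arr m = pvBSearch s m 100000000 0 100000000 := rfl
  have Hanti : ∀ d d', 1 ≤ d → d ≤ d' → d' ≤ 100000000 →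
      pvFeasible s m d' = true → pvFeasible s m d = true := by
    intro d d' h1 h2 h3 hF
    exact (pv_bridge arr m d hm' h1 (by omega)).mpr
      (pv_Ed_anti arr m d d' h2 ((pv_bridge arr m d' hm' (by omega) h3).mp hF))
  obtain ⟨hb1, hb2, hb3, hb4⟩ := pv_bsearch_char s m Hanti 100000000 0 100000000
    (by norm_num) (by norm_num) (by norm_num) (by norm_num) (Or.inr rfl)
    (fun d hd1 hd2 => absurd hd1 (by omega))
  obtain ⟨ha1, ha2, ha3⟩ := pv_solution_mem arr m
  rw [← hrr] at hb1 hb2 hb3 hb4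
  apply le_antisymm
  · rcases ha1 with h | h
    · omega
    · by_contra hgt
      rw [not_le] at hgt
      obtain ⟨com, hmem, hI, hpw⟩ := h
      have hF : pvFeasible s m (solution arr m) = true :=
        (pv_bridge arr m (solution arr m) hm' (by omega) hI).mpr ⟨com, hmem, hI, hpw⟩
      rw [hb4 (solution arr m) hgt hI] at hF
      exact Bool.false_ne_true hF
  · rcases hb1 with h | h
    · by_cases hz : solution_alt arr m = 0
      · omega
      · have h1 : 1 ≤ solution_alt arr m := by omega
        exact ha3 _ ((pv_bridge arr m (solution_alt arr m) hm' h1 hb3).mp h)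
    · omega
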